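-- pv_equiv track=rewrite | github.com/dawalama/remote-dev-control | src/remote_dev_ctrl/server/middleware.py | match_path_pattern
-- ===== SOURCE A (Python) =====
-- def match_path_pattern(path: str, pattern: str) -> bool:
--     """Check if a path matches a pattern with {param} placeholders."""
--     path_parts = path.strip("/").split("/")
--     pattern_parts = pattern.strip("/").split("/")
--
--     if len(path_parts) != len(pattern_parts):
--         return False
--
--     for path_part, pattern_part in zip(path_parts, pattern_parts):
--         if pattern_part.startswith("{") and pattern_part.endswith("}"):
--             continue  # Wildcard match
--         if path_part != pattern_part:
--             return False
--
--     return True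
-- ===== SOURCE B (Python) =====
-- def match_path_pattern(path: str, pattern: str) -> bool:
--     """Check if a path matches a pattern with {param} placeholders."""
--     def go(ps, qs):
--         if not ps or not qs:
--             return not ps and not qs
--         q = qs[0]
--         if not (q.startswith("{") and q.endswith("}")) and ps[0] != q:
--             return False
--         return go(ps[1:], qs[1:])
--     return go(path.strip("/").split("/"), pattern.strip("/").split("/"))
-- ===== Notes on version B (the rewrite author's own statement) =====
-- stated objective: alternative
-- what changed: Replaces the up-front length check plus a zip-based for loop with a single structural recursion over the two segment lists whose base cases handle the length mismatch.
import Mathlib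
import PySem

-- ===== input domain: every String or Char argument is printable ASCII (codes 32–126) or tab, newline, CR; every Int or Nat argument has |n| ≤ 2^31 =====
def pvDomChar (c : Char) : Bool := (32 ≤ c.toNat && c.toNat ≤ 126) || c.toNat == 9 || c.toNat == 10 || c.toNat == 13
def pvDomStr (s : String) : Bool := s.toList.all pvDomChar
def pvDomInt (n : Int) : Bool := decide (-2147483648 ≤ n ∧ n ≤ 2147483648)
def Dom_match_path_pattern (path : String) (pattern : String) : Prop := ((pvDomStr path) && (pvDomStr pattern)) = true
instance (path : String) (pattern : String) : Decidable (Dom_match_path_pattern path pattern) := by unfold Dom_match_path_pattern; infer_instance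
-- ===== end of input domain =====

-- B replaces A's up-front length check plus zip loop by one structural recursion over both segment lists (objective: alternative decomposition).

-- ===== PORT A =====
-- the for-loop over zip(path_parts, pattern_parts), early return False
def mppLoopA : List (String × String) → Bool
  | [] => true
  | (p, q) :: rest =>
    if PySem.Str.startswith q "{" && PySem.Str.endswith q "}" then mppLoopA rest
    else if p ≠ q then false
    else mppLoopA rest

def match_path_pattern (path : String) (pattern : String) : Bool :=
  let pathParts := (PySem.Str.split? (PySem.Str.stripChars path "/") "/").getD []
  let patternParts := (PySem.Str.split? (PySem.Str.stripChars pattern "/") "/").getD []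
  if pathParts.length ≠ patternParts.length then false
  else mppLoopA (pathParts.zip patternParts)

-- ===== PORT B =====
-- the recursive helper go(ps, qs)
def mppGoB : List String → List String → Bool
  | [], [] => true
  | [], _ :: _ => false
  | _ :: _, [] => false
  | p :: ps, q :: qs =>
    if !(PySem.Str.startswith q "{" && PySem.Str.endswith q "}") && p ≠ q then false
    else mppGoB ps qs

def match_path_pattern_alt (path : String) (pattern : String) : Bool :=
  mppGoB ((PySem.Str.split? (PySem.Str.stripChars path "/") "/").getD [])
         ((PySem.Str.split? (PySem.Str.stripChars pattern "/") "/").getD [])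

-- ===== PRECONDITION & SPEC =====
def Spec_match_path_pattern (path : String) (pattern : String) (out : Bool) : Prop := out = match_path_pattern_alt path pattern
instance (path : String) (pattern : String) (out : Bool) : Decidable (Spec_match_path_pattern path pattern out) := by unfold Spec_match_path_pattern; infer_instance

-- ===== CLAIM (what is proved, stated in full; the proofs are below) =====
def Claim_equal_match_path_pattern : Prop := ∀ (path : String) (pattern : String), Dom_match_path_pattern path pattern → Spec_match_path_pattern path pattern (match_path_pattern path pattern)

-- ===== LEMMAS AND PROOFS =====
theorem mpp_loop_eq_go (ps qs : List String) :
    (decide (ps.length = qs.length) && mppLoopA (ps.zip qs)) = mppGoB ps qs := by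
  induction ps generalizing qs with
  | nil => cases qs <;> simp [mppLoopA, mppGoB]
  | cons p ps ih =>
    cases qs with
    | nil => simp [mppGoB]
    | cons q qs =>
      have h := ih qs
      simp only [List.length_cons, List.zip_cons_cons, mppLoopA, mppGoB]
      cases hs : PySem.Str.startswith q "{" <;>
        cases he : PySem.Str.endswith q "}" <;>
        by_cases hpq : p = q <;>
        by_cases hl : ps.length = qs.length <;>
        simp_all

-- ===== VERDICT (by name: the statement is the Claim_ definition above) =====
theorem match_path_pattern_spec : Claim_equal_match_path_pattern := by
  intro path pattern _
  unfold Spec_match_path_pattern match_path_pattern match_path_pattern_alt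
  rw [← mpp_loop_eq_go]
  simp only []
  split_ifs with h <;> simp [h] <;> intro _ <;> omega
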